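-- pv_equiv track=rewrite | github.com/P8ace/dsa | py/src/intro/n_squared_test.py | get_first_names
-- ===== SOURCE A (Python) =====
-- def get_first_names(num):
--     names = []
--     for i in range(num):
--         m = i % 3
--         if m == 0:
--             names.append(f"bob{i}")
--         elif m == 1:
--             names.append(f"maria{i}")
--         elif m == 2:
--             names.append(f"sally{i}")
--     return names
-- ===== SOURCE B (Python) =====
-- def get_first_names(num):
--     # Unrolled by the period of 3: emit a whole round (bob, maria, sally) per
--     # iteration, then the remainder names; no per-element modulo or branching.
--     if num <= 0:
--         return []
--     out = []
--     rounds, rem = divmod(num, 3)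
--     for k in range(rounds):
--         b = 3 * k
--         out.extend(("bob%d" % b, "maria%d" % (b + 1), "sally%d" % (b + 2)))
--     base = 3 * rounds
--     if rem >= 1:
--         out.append("bob%d" % base)
--     if rem == 2:
--         out.append("maria%d" % (base + 1))
--     return out
-- ===== Notes on version B (the rewrite author's own statement) =====
-- stated objective: alternative
-- what changed: B unrolls the loop by the period of 3: it iterates once per full (bob, maria, sally) round emitting three names at a time, then appends the at-most-two remainder names, eliminating A's per-element modulo and three-way branch dispatch.
import Mathlib
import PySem

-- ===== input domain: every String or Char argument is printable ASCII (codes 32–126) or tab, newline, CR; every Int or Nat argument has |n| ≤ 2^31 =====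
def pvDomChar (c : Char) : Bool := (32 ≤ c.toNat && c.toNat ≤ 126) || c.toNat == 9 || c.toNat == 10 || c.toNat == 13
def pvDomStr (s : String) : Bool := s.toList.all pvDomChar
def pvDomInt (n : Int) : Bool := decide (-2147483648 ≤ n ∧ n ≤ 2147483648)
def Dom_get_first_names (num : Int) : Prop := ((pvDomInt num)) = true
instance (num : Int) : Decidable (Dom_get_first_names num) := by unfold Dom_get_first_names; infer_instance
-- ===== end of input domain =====

-- B unrolls the loop by the period of 3: one iteration per full (bob, maria, sally)
-- round plus a remainder step, instead of A's per-element modulo dispatch (alternative; same cost).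

-- ===== PORT A =====
def get_first_names (num : Int) : List String :=
  (PySem.List.pyRange 0 num 1).foldl (fun names i =>
    let m := PySem.Int.mod i 3
    if m = 0 then names ++ ["bob" ++ PySem.Int.toStr i]
    else if m = 1 then names ++ ["maria" ++ PySem.Int.toStr i]
    else if m = 2 then names ++ ["sally" ++ PySem.Int.toStr i]
    else names) []

-- ===== PORT B =====
def get_first_names_alt (num : Int) : List String :=
  if num ≤ 0 then []
  else
    let rounds := PySem.Int.floordiv num 3
    let rem := PySem.Int.mod num 3
    let out := (PySem.List.pyRange 0 rounds 1).foldl (fun out k =>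
      let b := 3 * k
      out ++ ["bob" ++ PySem.Int.toStr b, "maria" ++ PySem.Int.toStr (b + 1),
              "sally" ++ PySem.Int.toStr (b + 2)]) []
    let out := if rem ≥ 1 then out ++ ["bob" ++ PySem.Int.toStr (3 * rounds)] else out
    if rem = 2 then out ++ ["maria" ++ PySem.Int.toStr (3 * rounds + 1)] else out

-- ===== PRECONDITION & SPEC =====
def Spec_get_first_names (num : Int) (out : List String) : Prop := out = get_first_names_alt num
instance (num : Int) (out : List String) : Decidable (Spec_get_first_names num out) := by unfold Spec_get_first_names; infer_instance

-- ===== CLAIM (what is proved, stated in full; the proofs are below) =====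
def Claim_equal_get_first_names : Prop := ∀ (num : Int), Dom_get_first_names num → Spec_get_first_names num (get_first_names num)

-- ===== LEMMAS AND PROOFS =====

-- the per-index name both programs produce
def pvName (i : Int) : String :=
  if PySem.Int.mod i 3 = 0 then "bob" ++ PySem.Int.toStr i
  else if PySem.Int.mod i 3 = 1 then "maria" ++ PySem.Int.toStr i
  else "sally" ++ PySem.Int.toStr i

theorem pvMod3 (a : Int) : PySem.Int.mod a 3 = a % 3 :=
  PySem.Int.mod_eq_emod_of_pos (by omega)

theorem pvName_3k (k : Int) : pvName (3 * k) = "bob" ++ PySem.Int.toStr (3 * k) := by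
  unfold pvName; rw [pvMod3]; simp [Int.mul_emod_right]

theorem pvName_3k1 (k : Int) : pvName (3 * k + 1) = "maria" ++ PySem.Int.toStr (3 * k + 1) := by
  unfold pvName; rw [pvMod3]
  have h : (3 * k + 1) % 3 = 1 := by omega
  rw [h]; simp

theorem pvName_3k2 (k : Int) : pvName (3 * k + 2) = "sally" ++ PySem.Int.toStr (3 * k + 2) := by
  unfold pvName; rw [pvMod3]
  have h : (3 * k + 2) % 3 = 2 := by omega
  rw [h]; simp

-- A is the per-index map of pvName over range(num)
theorem pvA_eq_map (num : Int) :
    get_first_names num = (PySem.List.pyRange 0 num 1).map pvName := by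
  unfold get_first_names
  have hcong : (PySem.List.pyRange 0 num 1).foldl (fun names i =>
      let m := PySem.Int.mod i 3
      if m = 0 then names ++ ["bob" ++ PySem.Int.toStr i]
      else if m = 1 then names ++ ["maria" ++ PySem.Int.toStr i]
      else if m = 2 then names ++ ["sally" ++ PySem.Int.toStr i]
      else names) []
      = (PySem.List.pyRange 0 num 1).foldl (fun names i => names ++ [pvName i]) [] := by
    apply PySem.List.foldl_congr_mem
    intro names i _
    have h0 : 0 ≤ PySem.Int.mod i 3 := PySem.Int.mod_nonneg (a := i) (b := 3) (by omega)
    have h3 : PySem.Int.mod i 3 < 3 := PySem.Int.mod_lt (a := i) (b := 3) (by omega)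
    simp only [pvName]
    interval_cases h : PySem.Int.mod i 3 <;> simp
  rw [hcong, PySem.List.foldl_append_singleton_eq_map]
  simp

-- B's round loop produces the first 3*n names
theorem pvRounds (n : Nat) :
    (PySem.List.pyRange 0 (n : Int) 1).foldl (fun out k =>
      let b := 3 * k
      out ++ ["bob" ++ PySem.Int.toStr b, "maria" ++ PySem.Int.toStr (b + 1),
              "sally" ++ PySem.Int.toStr (b + 2)]) []
    = (PySem.List.pyRange 0 (3 * (n : Int)) 1).map pvName := by
  induction n with
  | zero => simp [PySem.List.pyRange_one_eq_nil]
  | succ m ih =>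
    have h1 : ((m : Int) + 1 : Int) = ((m + 1 : Nat) : Int) := by push_cast; ring
    rw [← h1, PySem.List.pyRange_one_succ_right (by positivity), List.foldl_append, ih]
    have hsplit : PySem.List.pyRange 0 (3 * ((m : Int) + 1)) 1
        = PySem.List.pyRange 0 (3 * (m : Int)) 1 ++ PySem.List.pyRange (3 * (m : Int)) (3 * ((m : Int) + 1)) 1 :=
      PySem.List.pyRange_one_append 0 (3 * (m : Int)) (3 * ((m : Int) + 1)) (by positivity) (by omega)
    rw [hsplit, List.map_append]
    have e1 : PySem.List.pyRange (3 * (m : Int)) (3 * ((m : Int) + 1)) 1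
        = [3 * (m : Int), 3 * (m : Int) + 1, 3 * (m : Int) + 2] := by
      rw [PySem.List.pyRange_one_cons (by omega), PySem.List.pyRange_one_cons (by omega),
          PySem.List.pyRange_one_cons (by omega), PySem.List.pyRange_one_eq_nil (by omega)]
      norm_num
      omega
    rw [e1]
    simp only [List.foldl_cons, List.foldl_nil, List.map_cons, List.map_nil, 
      pvName_3k, pvName_3k1, pvName_3k2]

-- ===== VERDICT (by name: the statement is the Claim_ definition above) =====
theorem get_first_names_spec : Claim_equal_get_first_names := by
  intro num _
  unfold Spec_get_first_names
  rw [pvA_eq_map]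
  unfold get_first_names_alt
  by_cases hle : num ≤ 0
  · simp [hle, PySem.List.pyRange_one_eq_nil hle]
  · simp only [hle, if_false]
    have hpos : 0 < num := by omega
    set q := PySem.Int.floordiv num 3 with hq
    set r := PySem.Int.mod num 3 with hr
    have hqr : q * 3 + r = num := PySem.Int.floordiv_mul_add_mod num 3
    have hr0 : 0 ≤ r := PySem.Int.mod_nonneg (a := num) (b := 3) (by omega)
    have hr3 : r < 3 := PySem.Int.mod_lt (a := num) (b := 3) (by omega)
    have hq0 : 0 ≤ q := by omega
    have hqnat : q = ((q.toNat : Nat) : Int) := by omega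
    have hrounds := pvRounds q.toNat
    rw [← hqnat] at hrounds
    have hsplit : PySem.List.pyRange 0 num 1
        = PySem.List.pyRange 0 (3 * q) 1 ++ PySem.List.pyRange (3 * q) num 1 :=
      PySem.List.pyRange_one_append 0 (3 * q) num (by omega) (by omega)
    rw [hsplit, List.map_append, hrounds]
    interval_cases r
    · have hnil : PySem.List.pyRange (3 * q) num 1 = [] :=
        PySem.List.pyRange_one_eq_nil (by omega)
      rw [hnil]
      norm_num
    · have htail : PySem.List.pyRange (3 * q) num 1 = [3 * q] := by
        rw [show num = 3 * q + 1 by omega]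
        exact PySem.List.pyRange_one_singleton (3 * q)
      rw [htail]
      norm_num [pvName_3k]
    · have hnil : PySem.List.pyRange (3 * q + 1 + 1) num 1 = [] :=
        PySem.List.pyRange_one_eq_nil (by omega)
      have htail : PySem.List.pyRange (3 * q) num 1 = [3 * q, 3 * q + 1] := by
        rw [PySem.List.pyRange_one_cons (a := 3 * q) (b := num) (by omega),
            PySem.List.pyRange_one_cons (a := 3 * q + 1) (b := num) (by omega), hnil]
      rw [htail]
      norm_num [pvName_3k, pvName_3k1]
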